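-- pv_equiv track=rewrite | github.com/AlainaMariaJoe/Coding-Practice | 045_Sort_character_type_AMJ.py | sort_char_list
-- ===== SOURCE A (Python) =====
-- def sort_char_list(s):
--     Upper_list = []
--     lower_list = []
--     space_list = []
--     others_list = []
--     for i in s:
--         if i.isupper():
--             Upper_list.append(i)
--         elif i.islower():
--             lower_list.append(i)
--         elif i.isspace():
--             space_list.append(i)
--         else:
--             others_list.append(i)
--     return ''.join(Upper_list + lower_list + space_list + others_list)
-- ===== SOURCE B (Python) =====
-- def sort_char_list(s):
--     def rank(c):
--         if c.isupper():
--             return 0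
--         if c.islower():
--             return 1
--         if c.isspace():
--             return 2
--         return 3
--     return ''.join(sorted(s, key=rank))
-- ===== Notes on version B (the rewrite author's own statement) =====
-- stated objective: idiomatic
-- what changed: Replaces the four-bucket single-pass partition with one stable sorted(s, key=rank) call whose rank mirrors the isupper/islower/isspace precedence, relying on sort stability for within-category order.
import Mathlib
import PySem

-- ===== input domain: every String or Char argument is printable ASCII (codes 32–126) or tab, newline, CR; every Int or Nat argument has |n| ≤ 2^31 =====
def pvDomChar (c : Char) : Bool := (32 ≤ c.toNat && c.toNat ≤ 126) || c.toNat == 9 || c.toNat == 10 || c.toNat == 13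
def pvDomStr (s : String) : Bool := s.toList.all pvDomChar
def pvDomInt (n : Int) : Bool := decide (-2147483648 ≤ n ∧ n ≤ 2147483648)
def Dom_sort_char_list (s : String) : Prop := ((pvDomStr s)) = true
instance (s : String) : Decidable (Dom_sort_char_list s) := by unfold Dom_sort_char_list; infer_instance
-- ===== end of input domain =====

-- B replaces A's four-bucket single-pass partition with one stable sort keyed by
-- category rank (idiomatic); return values proved equal on the whole domain.

-- ===== PORT A =====
-- literal transliteration: four accumulator lists, one pass, join of their concatenation
def sort_char_list (s : String) : String :=
  let st := s.toList.foldl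
    (fun (acc : List Char × List Char × List Char × List Char) i =>
      if PySem.Chars.isupper i then (acc.1 ++ [i], acc.2.1, acc.2.2.1, acc.2.2.2)
      else if PySem.Chars.islower i then (acc.1, acc.2.1 ++ [i], acc.2.2.1, acc.2.2.2)
      else if PySem.Chars.isspace i then (acc.1, acc.2.1, acc.2.2.1 ++ [i], acc.2.2.2)
      else (acc.1, acc.2.1, acc.2.2.1, acc.2.2.2 ++ [i]))
    ([], [], [], [])
  String.mk (st.1 ++ st.2.1 ++ st.2.2.1 ++ st.2.2.2)

-- ===== PORT B =====
-- rank(c): same precedence chain as Python B's inner rank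
def pvRank (c : Char) : Nat :=
  if PySem.Chars.isupper c then 0
  else if PySem.Chars.islower c then 1
  else if PySem.Chars.isspace c then 2
  else 3

-- ''.join(sorted(s, key=rank))
def sort_char_list_alt (s : String) : String :=
  String.mk (PySem.List.sorted s.toList pvRank)

-- ===== PRECONDITION & SPEC =====
def Spec_sort_char_list (s : String) (out : String) : Prop := out = sort_char_list_alt s
instance (s : String) (out : String) : Decidable (Spec_sort_char_list s out) := by unfold Spec_sort_char_list; infer_instance

-- ===== CLAIM (what is proved, stated in full; the proofs are below) =====
def Claim_equal_sort_char_list : Prop := ∀ (s : String), Dom_sort_char_list s → Spec_sort_char_list s (sort_char_list s)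

-- ===== LEMMAS AND PROOFS =====

theorem insertBy_append_not_before (before : Char → Char → Bool) (x : Char)
    (l1 l2 : List Char) (h : ∀ y ∈ l1, before x y = false) :
    PySem.List.insertBy before x (l1 ++ l2) = l1 ++ PySem.List.insertBy before x l2 := by
  induction l1 with
  | nil => rfl
  | cons y ys ih =>
    have hy : before x y = false := h y (by simp)
    simp only [List.cons_append, PySem.List.insertBy, hy]
    simp only [Bool.false_eq_true, if_false]
    exact congrArg (y :: ·) (ih fun z hz => h z (by simp [hz]))

theorem insertBy_forall_before (before : Char → Char → Bool) (x : Char)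
    (l : List Char) (h : ∀ y ∈ l, before x y = true) :
    PySem.List.insertBy before x l = x :: l := by
  cases l with
  | nil => rfl
  | cons y ys => simp [PySem.List.insertBy, h y (by simp)]

def pvBefore : Char → Char → Bool := fun a b => decide (pvRank a < pvRank b)

def pvF (k : Nat) (xs : List Char) : List Char := xs.filter (fun c => pvRank c == k)

theorem pvRank_lt_four (c : Char) : pvRank c < 4 := by
  unfold pvRank; split_ifs <;> omega

theorem sorted_buckets (xs b0 b1 b2 b3 : List Char)
    (h0 : ∀ c ∈ b0, pvRank c = 0) (h1 : ∀ c ∈ b1, pvRank c = 1)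
    (h2 : ∀ c ∈ b2, pvRank c = 2) (h3 : ∀ c ∈ b3, pvRank c = 3) :
    xs.foldl (fun acc x => PySem.List.insertBy pvBefore x acc) (b0 ++ (b1 ++ (b2 ++ b3)))
      = (b0 ++ pvF 0 xs) ++ ((b1 ++ pvF 1 xs) ++ ((b2 ++ pvF 2 xs) ++ (b3 ++ pvF 3 xs))) := by
  induction xs generalizing b0 b1 b2 b3 with
  | nil => simp [pvF]
  | cons x xs ih =>
    have hx4 := pvRank_lt_four x
    simp only [List.foldl_cons]
    interval_cases hx : pvRank x
    · -- rank 0: insert at end of b0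
      have : PySem.List.insertBy pvBefore x (b0 ++ (b1 ++ (b2 ++ b3)))
          = (b0 ++ [x]) ++ (b1 ++ (b2 ++ b3)) := by
        rw [insertBy_append_not_before pvBefore x b0 _
            (fun y hy => by simp [pvBefore, hx, h0 y hy]),
          insertBy_forall_before pvBefore x _ (by
            intro y hy
            simp only [List.mem_append] at hy
            rcases hy with hy | hy | hy
            · simp [pvBefore, hx, h1 y hy]
            · simp [pvBefore, hx, h2 y hy]
            · simp [pvBefore, hx, h3 y hy])]
        simp
      rw [this, ih (b0 ++ [x]) b1 b2 b3
          (by intro c hc; rcases List.mem_append.mp hc with hc | hc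
              · exact h0 c hc
              · simpa using (List.mem_singleton.mp hc ▸ hx)) h1 h2 h3]
      simp [pvF, List.filter_cons, hx]
    · -- rank 1: insert at end of b1
      have : PySem.List.insertBy pvBefore x (b0 ++ (b1 ++ (b2 ++ b3)))
          = b0 ++ ((b1 ++ [x]) ++ (b2 ++ b3)) := by
        rw [insertBy_append_not_before pvBefore x b0 _
            (fun y hy => by simp [pvBefore, hx, h0 y hy]),
          insertBy_append_not_before pvBefore x b1 _
            (fun y hy => by simp [pvBefore, hx, h1 y hy]),
          insertBy_forall_before pvBefore x _ (by
            intro y hy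
            rcases List.mem_append.mp hy with hy | hy
            · simp [pvBefore, hx, h2 y hy]
            · simp [pvBefore, hx, h3 y hy])]
        simp
      rw [this, ih b0 (b1 ++ [x]) b2 b3 h0
          (by intro c hc; rcases List.mem_append.mp hc with hc | hc
              · exact h1 c hc
              · simpa using (List.mem_singleton.mp hc ▸ hx)) h2 h3]
      simp [pvF, List.filter_cons, hx]
    · -- rank 2: insert at end of b2
      have : PySem.List.insertBy pvBefore x (b0 ++ (b1 ++ (b2 ++ b3)))
          = b0 ++ (b1 ++ ((b2 ++ [x]) ++ b3)) := by
        rw [insertBy_append_not_before pvBefore x b0 _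
            (fun y hy => by simp [pvBefore, hx, h0 y hy]),
          insertBy_append_not_before pvBefore x b1 _
            (fun y hy => by simp [pvBefore, hx, h1 y hy]),
          insertBy_append_not_before pvBefore x b2 _
            (fun y hy => by simp [pvBefore, hx, h2 y hy]),
          insertBy_forall_before pvBefore x b3
            (fun y hy => by simp [pvBefore, hx, h3 y hy])]
        simp
      rw [this, ih b0 b1 (b2 ++ [x]) b3 h0 h1
          (by intro c hc; rcases List.mem_append.mp hc with hc | hc
              · exact h2 c hc
              · simpa using (List.mem_singleton.mp hc ▸ hx)) h3]
      simp [pvF, List.filter_cons, hx]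
    · -- rank 3: insert at the very end
      have : PySem.List.insertBy pvBefore x (b0 ++ (b1 ++ (b2 ++ b3)))
          = b0 ++ (b1 ++ (b2 ++ (b3 ++ [x]))) := by
        rw [insertBy_append_not_before pvBefore x b0 _
            (fun y hy => by simp [pvBefore, hx, h0 y hy]),
          insertBy_append_not_before pvBefore x b1 _
            (fun y hy => by simp [pvBefore, hx, h1 y hy]),
          insertBy_append_not_before pvBefore x b2 _
            (fun y hy => by simp [pvBefore, hx, h2 y hy]),
          PySem.List.insertBy_of_forall_not_before pvBefore x b3
            (fun y hy => by simp [pvBefore, hx, h3 y hy])]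
      rw [this, ih b0 b1 b2 (b3 ++ [x]) h0 h1 h2
          (by intro c hc; rcases List.mem_append.mp hc with hc | hc
              · exact h3 c hc
              · simpa using (List.mem_singleton.mp hc ▸ hx))]
      simp [pvF, List.filter_cons, hx]

theorem foldA_buckets (xs : List Char) (b0 b1 b2 b3 : List Char) :
    xs.foldl
      (fun (acc : List Char × List Char × List Char × List Char) i =>
        if PySem.Chars.isupper i then (acc.1 ++ [i], acc.2.1, acc.2.2.1, acc.2.2.2)
        else if PySem.Chars.islower i then (acc.1, acc.2.1 ++ [i], acc.2.2.1, acc.2.2.2)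
        else if PySem.Chars.isspace i then (acc.1, acc.2.1, acc.2.2.1 ++ [i], acc.2.2.2)
        else (acc.1, acc.2.1, acc.2.2.1, acc.2.2.2 ++ [i]))
      (b0, b1, b2, b3)
      = (b0 ++ pvF 0 xs, b1 ++ pvF 1 xs, b2 ++ pvF 2 xs, b3 ++ pvF 3 xs) := by
  induction xs generalizing b0 b1 b2 b3 with
  | nil => simp [pvF]
  | cons x xs ih =>
    simp only [List.foldl_cons]
    by_cases hU : PySem.Chars.isupper x
    · rw [if_pos hU, ih]; simp [pvF, List.filter_cons, pvRank, hU]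
    · rw [if_neg hU]
      by_cases hL : PySem.Chars.islower x
      · rw [if_pos hL, ih]; simp [pvF, List.filter_cons, pvRank, hU, hL]
      · rw [if_neg hL]
        by_cases hS : PySem.Chars.isspace x
        · rw [if_pos hS, ih]; simp [pvF, List.filter_cons, pvRank, hU, hL, hS]
        · rw [if_neg hS, ih]; simp [pvF, List.filter_cons, pvRank, hU, hL, hS]

-- ===== VERDICT (by name: the statement is the Claim_ definition above) =====
theorem sort_char_list_spec : Claim_equal_sort_char_list := by
  intro s _
  unfold Spec_sort_char_list sort_char_list sort_char_list_alt
  rw [PySem.List.sorted_eq_foldl_insertBy]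
  have hB := sorted_buckets s.toList [] [] [] []
    (by simp) (by simp) (by simp) (by simp)
  simp only [List.nil_append] at hB
  unfold pvBefore at hB
  have hA := foldA_buckets s.toList [] [] [] []
  simp only [List.nil_append] at hA
  simp only [hA, hB, List.append_assoc]
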